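-- pv_equiv track=rewrite | github.com/diyaS-15/healthcare-app | streamlit_app.py | build_key_findings
-- ===== SOURCE A (Python) =====
-- def build_key_findings(markers: list[dict]) -> list[str]:
--     if not markers:
--         return []
--
--     abnormal = [marker for marker in markers if marker.get("status") in {"high", "low"}]
--     if not abnormal:
--         return ["All extracted markers are within their listed reference ranges."]
--
--     findings = []
--     for marker in abnormal[:3]:
--         direction = "higher" if marker.get("status") == "high" else "lower"
--         findings.append(f"{marker.get('name', 'A marker')} is {direction} than the listed range.")
--     return findings
-- ===== SOURCE B (Python) =====
-- def _skip_normal(rest: list[dict]) -> list[dict]: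
--     """Return the suffix of `rest` starting at its first abnormal marker."""
--     i = 0
--     while i < len(rest) and rest[i].get("status") not in ("high", "low"):
--         i += 1
--     return rest[i:]
--
--
-- def _collect(rest: list[dict], remaining: int) -> list[str]:
--     """Emit up to `remaining` messages by repeatedly searching for the next abnormal marker."""
--     if remaining == 0:
--         return []
--     rest = _skip_normal(rest)
--     if not rest:
--         return []
--     head = rest[0]
--     direction = "higher" if head.get("status") == "high" else "lower"
--     return [f"{head.get('name', 'A marker')} is {direction} than the listed range."] + _collect(rest[1:], remaining - 1)
--
--
-- def build_key_findings(markers: list[dict]) -> list[str]: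
--     if not markers:
--         return []
--     findings = _collect(markers, 3)
--     if findings:
--         return findings
--     return ["All extracted markers are within their listed reference ranges."]
-- ===== Notes on version B (the rewrite author's own statement) =====
-- stated objective: alternative
-- what changed: Replaces A's staged pipeline (filter comprehension, slice to 3, then an accumulator loop over the slice) by a bounded search-and-emit recursion: at most three times it skips to the next abnormal marker, emits its message, and recurses on the remaining suffix, never building the abnormal list.
import Mathlib
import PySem

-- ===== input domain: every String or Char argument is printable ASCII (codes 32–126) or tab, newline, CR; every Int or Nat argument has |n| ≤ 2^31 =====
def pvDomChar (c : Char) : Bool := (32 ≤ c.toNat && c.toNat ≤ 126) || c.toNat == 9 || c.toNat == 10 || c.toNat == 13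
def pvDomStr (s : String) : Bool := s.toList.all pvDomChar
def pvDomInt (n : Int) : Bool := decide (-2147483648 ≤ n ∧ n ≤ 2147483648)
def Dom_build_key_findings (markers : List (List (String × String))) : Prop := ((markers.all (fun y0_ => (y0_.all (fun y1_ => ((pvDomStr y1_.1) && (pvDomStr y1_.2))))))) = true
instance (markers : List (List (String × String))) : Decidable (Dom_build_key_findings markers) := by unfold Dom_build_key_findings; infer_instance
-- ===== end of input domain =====

-- B replaces A's staged pipeline (filter, slice, accumulator loop) by a bounded search-and-emit
-- recursion: at most 3 times, skip to the next abnormal marker, emit, recurse on the rest;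
-- objective: alternative (same cost class).

-- dict.get(k) on the association-list representation: first match (exact for a Python dict, which has unique keys)
def pvGet (m : List (String × String)) (k : String) : Option String :=
  (m.find? (fun p => p.1 == k)).map (·.2)

-- ===== PORT A =====
def pvIsAbn (m : List (String × String)) : Bool :=
  pvGet m "status" == some "high" || pvGet m "status" == some "low"

def build_key_findings (markers : List (List (String × String))) : List String :=
  if markers = [] then []
  else
    let abnormal := markers.filter pvIsAbn
    if abnormal = [] then ["All extracted markers are within their listed reference ranges."]
    else
      (PySem.List.slice abnormal none (some 3)).foldl
        (fun findings m =>
          let direction := if pvGet m "status" == some "high" then "higher" else "lower"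
          findings ++ [((pvGet m "name").getD "A marker") ++ " is " ++ direction ++ " than the listed range."])
        []

-- ===== PORT B =====
-- _skip_normal: advance past the leading non-abnormal markers, return the remaining suffix
def pvSkipNormal : List (List (String × String)) → List (List (String × String))
  | [] => []
  | m :: rest => if pvIsAbn m then m :: rest else pvSkipNormal rest

-- _collect: at most `remaining` rounds of skip-to-abnormal, emit its message, recurse on the rest
def pvCollect : List (List (String × String)) → Nat → List String
  | _, 0 => []
  | rest, remaining + 1 =>
    match pvSkipNormal rest with
    | [] => []
    | head :: tail =>
      let direction := if pvGet head "status" = some "high" then "higher" else "lower"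
      (((pvGet head "name").getD "A marker") ++ " is " ++ direction ++ " than the listed range.")
        :: pvCollect tail remaining

def build_key_findings_alt (markers : List (List (String × String))) : List String :=
  if markers = [] then []
  else
    let findings := pvCollect markers 3
    if findings ≠ [] then findings
    else ["All extracted markers are within their listed reference ranges."]

-- ===== PRECONDITION & SPEC =====
def Spec_build_key_findings (markers : List (List (String × String))) (out : List String) : Prop := out = build_key_findings_alt markers
instance (markers : List (List (String × String))) (out : List String) : Decidable (Spec_build_key_findings markers out) := by unfold Spec_build_key_findings; infer_instance

-- ===== CLAIM (what is proved, stated in full; the proofs are below) =====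
def Claim_equal_build_key_findings : Prop := ∀ (markers : List (List (String × String))), Dom_build_key_findings markers → Spec_build_key_findings markers (build_key_findings markers)

-- ===== LEMMAS AND PROOFS =====

def pvMsgOf (m : List (String × String)) : String :=
  ((pvGet m "name").getD "A marker") ++ " is " ++
    (if pvGet m "status" == some "high" then "higher" else "lower") ++ " than the listed range."

theorem pvSkipNormal_nil (l : List (List (String × String))) (h : pvSkipNormal l = []) :
    l.filter pvIsAbn = [] := by
  induction l with
  | nil => simp
  | cons m rest ih =>
    by_cases hm : pvIsAbn m = true
    · simp [pvSkipNormal, hm] at h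
    · simp only [pvSkipNormal, hm, Bool.false_eq_true, if_false] at h
      simp [List.filter_cons, hm, ih h]

theorem pvSkipNormal_cons (l : List (List (String × String)))
    (head : List (String × String)) (tail : List (List (String × String)))
    (h : pvSkipNormal l = head :: tail) :
    pvIsAbn head = true ∧ l.filter pvIsAbn = head :: tail.filter pvIsAbn := by
  induction l with
  | nil => simp [pvSkipNormal] at h
  | cons m rest ih =>
    by_cases hm : pvIsAbn m = true
    · simp only [pvSkipNormal, hm, if_true] at h
      obtain ⟨rfl, rfl⟩ := h
      simp [List.filter_cons, hm]
    · simp only [pvSkipNormal, hm, Bool.false_eq_true, if_false] at h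
      obtain ⟨hab, hfil⟩ := ih h
      exact ⟨hab, by simp [List.filter_cons, hm, hfil]⟩

theorem pvCollect_eq (k : Nat) :
    ∀ l : List (List (String × String)),
      pvCollect l k = ((l.filter pvIsAbn).take k).map pvMsgOf := by
  induction k with
  | zero => intro l; simp [pvCollect]
  | succ n ih =>
    intro l
    cases hsk : pvSkipNormal l with
    | nil => simp [pvCollect, hsk, pvSkipNormal_nil l hsk]
    | cons head tail =>
      obtain ⟨hab, hfil⟩ := pvSkipNormal_cons l head tail hsk
      by_cases hh : pvGet head "status" = some "high"
      · simp [pvCollect, hsk, hfil, hh, ih tail, pvMsgOf, String.append_assoc]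
      · have hl : pvGet head "status" = some "low" := by
          rcases (by simpa [pvIsAbn] using hab : pvGet head "status" = some "high" ∨
            pvGet head "status" = some "low") with h | h
          · exact absurd h hh
          · exact h
        simp [pvCollect, hsk, hfil, hh, hl, ih tail, pvMsgOf, String.append_assoc]

theorem buildA_eq (abnormal : List (List (String × String))) :
    (PySem.List.slice abnormal none (some 3)).foldl
        (fun findings m =>
          let direction := if pvGet m "status" == some "high" then "higher" else "lower"
          findings ++ [((pvGet m "name").getD "A marker") ++ " is " ++ direction ++ " than the listed range."])
        []
      = (abnormal.take 3).map pvMsgOf := by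
  have hsl : PySem.List.slice abnormal none (some 3) = abnormal.take 3 := by
    simp [PySem.List.slice, PySem.List.clampIdx]
  rw [hsl]
  induction abnormal.take 3 using List.reverseRecOn with
  | nil => rfl
  | append_singleton xs x ih =>
    rw [List.foldl_append, ih]
    simp [pvMsgOf]

-- ===== VERDICT (by name: the statement is the Claim_ definition above) =====
theorem build_key_findings_spec : Claim_equal_build_key_findings := by
  intro markers _
  unfold Spec_build_key_findings build_key_findings build_key_findings_alt
  by_cases hm : markers = []
  · simp [hm]
  · rw [if_neg hm, if_neg hm]
    rw [pvCollect_eq 3 markers]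
    by_cases hab : markers.filter pvIsAbn = []
    · simp [hab]
    · rw [if_neg hab, buildA_eq]
      have hne : ((markers.filter pvIsAbn).take 3).map pvMsgOf ≠ [] := by
        simp [List.take_eq_nil_iff, hab]
      rw [if_pos hne]
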